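-- pv_equiv track=rewrite | github.com/Piero24/AI20-21 | file 1.py | rovescia
-- ===== SOURCE A (Python) =====
-- def rovescia(stringa = ""):
--
--     x = ""
--
--     if type(stringa) != type("str"):
--
--         return "Error: Il parametro inserito non è una stringa!"
--
--     else:
--
--         if stringa == "":
--
--             return "Error: Stringa vuota!"
--
--         else:
--
--             for index in reversed(range(len(stringa))):
--
--                 if index == 0:
--
--                     x += stringa[index].upper()
--
--                 else:
--
--                     x += stringa[index].lower()
--
--             return x
-- ===== SOURCE B (Python) =====
-- def rovescia(stringa = ""):
--     if type(stringa) != type("str"):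
--         return "Error: Il parametro inserito non è una stringa!"
--     if stringa == "":
--         return "Error: Stringa vuota!"
--     return stringa[::-1][:-1].lower() + stringa[0].upper()
-- ===== Notes on version B (the rewrite author's own statement) =====
-- stated objective: faster
-- what changed: Replaces the reversed-index loop with its per-character if/else branch and repeated string concatenation by whole-string operations: a reversing slice, one bulk lower() on all but the last character, and one upper() of the original first character, joined by a single concatenation.
import Mathlib
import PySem

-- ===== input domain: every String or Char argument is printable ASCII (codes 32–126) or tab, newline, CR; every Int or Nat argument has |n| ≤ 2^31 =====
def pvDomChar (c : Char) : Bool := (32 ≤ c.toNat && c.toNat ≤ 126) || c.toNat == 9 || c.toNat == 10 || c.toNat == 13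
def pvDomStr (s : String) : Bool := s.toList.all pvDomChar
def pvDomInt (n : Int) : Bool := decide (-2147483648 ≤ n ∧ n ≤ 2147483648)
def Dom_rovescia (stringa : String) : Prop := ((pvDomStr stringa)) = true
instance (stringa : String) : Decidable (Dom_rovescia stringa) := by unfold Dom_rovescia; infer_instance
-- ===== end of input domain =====

-- B replaces A's reversed-index loop (with its per-index if/else) by whole-string operations:
-- a reversing slice, a bulk lower() of all but the last character, and the first char uppercased (idiomatic).
-- Under the type convention stringa is always a str, so A's type-guard branch never fires.

-- ===== PORT A =====
def rovescia (stringa : String) : String :=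
  -- type(stringa) != type("str") is False for every String argument; only the else branch is ported
  if stringa = "" then "Error: Stringa vuota!"
  else
    String.ofList
      (((PySem.List.pyRange 0 (PySem.Str.len stringa) 1).reverse).foldl
        (fun x index =>
          if index == 0 then
            x ++ PySem.Chars.upper [(PySem.List.pyGet? stringa.toList index).getD ' ']
          else
            x ++ PySem.Chars.lower [(PySem.List.pyGet? stringa.toList index).getD ' ']) [])

-- ===== PORT B =====
def rovescia_alt (stringa : String) : String :=
  if stringa = "" then "Error: Stringa vuota!"
  else
    let rev := (PySem.List.slice? stringa.toList none none (-1)).getD []   -- stringa[::-1]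
    String.ofList
      (PySem.Chars.lower (PySem.List.slice rev none (some (-1))) ++        -- [:-1].lower()
       PySem.Chars.upper [(PySem.List.pyGet? stringa.toList 0).getD ' '])  -- stringa[0].upper()

-- ===== PRECONDITION & SPEC =====
def Spec_rovescia (stringa : String) (out : String) : Prop := out = rovescia_alt stringa
instance (stringa : String) (out : String) : Decidable (Spec_rovescia stringa out) := by unfold Spec_rovescia; infer_instance

-- ===== CLAIM (what is proved, stated in full; the proofs are below) =====
def Claim_equal_rovescia : Prop := ∀ (stringa : String), Dom_rovescia stringa → Spec_rovescia stringa (rovescia stringa)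

-- ===== LEMMAS AND PROOFS =====

-- A's loop, on a nonempty list, produces lower(reverse(tail)) ++ upper([head]).
theorem rovescia_loop_eq (c : Char) (t : List Char) :
    (((PySem.List.pyRange 0 (((c :: t).length : Int)) 1).reverse).foldl
        (fun x index =>
          if index == 0 then
            x ++ PySem.Chars.upper [(PySem.List.pyGet? (c :: t) index).getD ' ']
          else
            x ++ PySem.Chars.lower [(PySem.List.pyGet? (c :: t) index).getD ' ']) [])
      = PySem.Chars.lower t.reverse ++ PySem.Chars.upper [c] := by
  have hsplit : PySem.List.pyRange 0 (((c :: t).length : Int)) 1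
      = PySem.List.pyRange 0 1 1 ++ PySem.List.pyRange 1 (((c :: t).length : Int)) 1 :=
    PySem.List.pyRange_one_append 0 1 _ (by omega) (by simp)
  have h01 : PySem.List.pyRange 0 1 1 = [0] := PySem.List.pyRange_one_singleton 0
  rw [hsplit, h01, List.reverse_append]
  simp only [List.reverse_singleton, List.foldl_append]
  -- on the indices of pyRange 1 len (all ≠ 0) only the lower-branch fires
  have hcong : (((PySem.List.pyRange 1 (((c :: t).length : Int)) 1).reverse).foldl
        (fun x index =>
          if index == 0 then
            x ++ PySem.Chars.upper [(PySem.List.pyGet? (c :: t) index).getD ' ']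
          else
            x ++ PySem.Chars.lower [(PySem.List.pyGet? (c :: t) index).getD ' ']) [])
      = (((PySem.List.pyRange 1 (((c :: t).length : Int)) 1).reverse).foldl
        (fun x index => x ++ [PySem.Chars.lowerChar ((PySem.List.pyGet? (c :: t) index).getD ' ')]) []) := by
    apply PySem.List.foldl_congr_mem
    intro acc i hi
    rw [List.mem_reverse, PySem.List.mem_pyRange_one] at hi
    have h0 : (i == 0) = false := by simp; omega
    rw [h0]
    rfl
  have hmap : ((PySem.List.pyRange 1 (((c :: t).length : Int)) 1).map
        (fun index => (PySem.List.pyGet? (c :: t) index).getD ' ')) = t := by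
    have := PySem.List.map_pyGetD_pyRange (xs := c :: t) (a := 1) (d := ' ') (by omega)
    simp only [PySem.List.pyGetD] at this
    simpa using this
  have hrev : ((PySem.List.pyRange 1 (((c :: t).length : Int)) 1).reverse.map
        (fun index => PySem.Chars.lowerChar ((PySem.List.pyGet? (c :: t) index).getD ' ')))
      = PySem.Chars.lower t.reverse :=
    calc ((PySem.List.pyRange 1 (((c :: t).length : Int)) 1).reverse.map
            (fun index => PySem.Chars.lowerChar ((PySem.List.pyGet? (c :: t) index).getD ' ')))
        = ((PySem.List.pyRange 1 (((c :: t).length : Int)) 1).reverse.map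
            (fun index => (PySem.List.pyGet? (c :: t) index).getD ' ')).map PySem.Chars.lowerChar := by
          simp [List.map_map, Function.comp]
      _ = (((PySem.List.pyRange 1 (((c :: t).length : Int)) 1).map
            (fun index => (PySem.List.pyGet? (c :: t) index).getD ' ')).reverse).map PySem.Chars.lowerChar := by
          rw [List.map_reverse]
      _ = t.reverse.map PySem.Chars.lowerChar := by rw [hmap]
      _ = PySem.Chars.lower t.reverse := rfl
  rw [hcong, PySem.List.foldl_append_singleton_eq_map, hrev]
  simp only [List.nil_append, List.foldl_cons, List.foldl_nil, beq_self_eq_true, if_pos]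
  rw [PySem.List.pyGet?_zero_cons]
  rfl

theorem rovescia_spec_aux (stringa : String) : rovescia stringa = rovescia_alt stringa := by
  by_cases h : stringa = ""
  · simp [rovescia, rovescia_alt, h]
  · have hne : stringa.toList ≠ [] := by
      intro hnil
      exact h (by rw [← String.ofList_toList (s := stringa), hnil])
    obtain ⟨c, t, hct⟩ := List.exists_cons_of_ne_nil hne
    simp only [rovescia, rovescia_alt, if_neg h]
    rw [PySem.List.slice?_none_none_neg_one]
    simp only [Option.getD_some, PySem.List.slice_to_neg_one]
    rw [show PySem.Str.len stringa = (stringa.toList.length : Int) from by simp [PySem.Str.len_eq]]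
    rw [hct, rovescia_loop_eq]
    have hdrop : (c :: t).reverse.dropLast = t.reverse := by
      simp [List.reverse_cons]
    rw [hdrop, PySem.List.pyGet?_zero_cons]
    rfl

-- ===== VERDICT (by name: the statement is the Claim_ definition above) =====
theorem rovescia_spec : Claim_equal_rovescia := by
  intro stringa _
  exact rovescia_spec_aux stringa
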